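-- pv_equiv track=rewrite | github.com/hao921213/data-structure | 群聚.py | count_infected_people
-- ===== SOURCE A (Python) =====
-- def count_infected_people(M, N, grid, visited, x, y):
--     if x < 0 or x >= M or y < 0 or y >= N or grid[x][y] == '.' or visited[x][y]:
--         return 0
--
--     visited[x][y] = True
--     infected_count = 1
--
--     for i in range(-1, 2):
--         for j in range(-1, 2):
--             infected_count += count_infected_people(M, N, grid, visited, x + i, y + j)
--
--     return infected_count
-- ===== SOURCE B (Python) =====
-- def count_infected_people(M, N, grid, visited, x, y):
--     DIRS = ((1, 1), (1, 0), (1, -1), (0, 1), (0, -1), (-1, 1), (-1, 0), (-1, -1))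
--     stack = [(x, y)]
--     infected = 0
--     while stack:
--         cx, cy = stack.pop()
--         if cx < 0 or cx >= M or cy < 0 or cy >= N or grid[cx][cy] == '.' or visited[cx][cy]:
--             continue
--         visited[cx][cy] = True
--         infected += 1
--         for dx, dy in DIRS:
--             stack.append((cx + dx, cy + dy))
--     return infected
-- ===== Notes on version B (the rewrite author's own statement) =====
-- stated objective: alternative
-- what changed: Replaces the 9-way recursive flood fill with an iterative explicit-stack flood fill that guards and marks at pop time, so no recursion (and no RecursionError risk on deep components).
-- outside the precondition, e.g. on count_infected_people(2, 1, [['.'], []], [[False], []], 0, 0): A returns 0, B returns 0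
import Mathlib
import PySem

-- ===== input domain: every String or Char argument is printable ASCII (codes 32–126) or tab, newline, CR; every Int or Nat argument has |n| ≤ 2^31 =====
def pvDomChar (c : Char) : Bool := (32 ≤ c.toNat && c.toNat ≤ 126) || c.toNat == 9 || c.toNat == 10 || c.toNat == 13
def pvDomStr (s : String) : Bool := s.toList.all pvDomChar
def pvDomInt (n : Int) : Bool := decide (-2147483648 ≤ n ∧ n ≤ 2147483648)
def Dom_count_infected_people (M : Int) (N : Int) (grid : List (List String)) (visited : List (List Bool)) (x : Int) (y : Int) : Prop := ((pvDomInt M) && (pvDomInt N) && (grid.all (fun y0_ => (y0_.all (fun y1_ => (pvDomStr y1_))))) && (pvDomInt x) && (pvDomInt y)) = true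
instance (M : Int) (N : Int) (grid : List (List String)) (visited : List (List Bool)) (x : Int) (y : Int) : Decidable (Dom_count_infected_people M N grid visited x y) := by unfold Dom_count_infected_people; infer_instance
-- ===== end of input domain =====

-- B replaces A's 9-way recursive flood fill by an iterative explicit-stack flood fill (guard and
-- mark at pop time); both mutate `visited` identically in Python, the equivalence proved here is
-- about the return value.

-- shared primitive accessors (out-of-range reads default to a blocked cell; inside Pre_ the
-- defaults are never hit, so they match Python's indexing there)
def pvGetV (v : List (List Bool)) (i j : Nat) : Bool := (v.getD i []).getD j true
def pvGetG (g : List (List String)) (i j : Nat) : String := (g.getD i []).getD j "."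
def pvMark (v : List (List Bool)) (i j : Nat) : List (List Bool) := v.set i ((v.getD i []).set j true)
def pvFalses (v : List (List Bool)) : Nat := (v.map (fun r => r.count false)).sum

-- row-level lemmas needed by the ports' termination arguments
theorem pvCountFalseSet (r : List Bool) (j : Nat) (h : r.getD j true = false) :
    (r.set j true).count false + 1 = r.count false := by
  induction r generalizing j with
  | nil => simp [List.getD] at h
  | cons hd tl ih =>
    cases j with
    | zero => simp [List.getD] at h; subst h; simp
    | succ j => simp [List.getD] at h ⊢; have := ih j h; simp [List.count_cons]; omega

theorem pvFalses_mark (v : List (List Bool)) (i j : Nat) (h : pvGetV v i j = false) :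
    pvFalses (pvMark v i j) + 1 = pvFalses v := by
  induction v generalizing i with
  | nil => simp [pvGetV, List.getD] at h
  | cons r t ih =>
    cases i with
    | zero =>
      simp [pvGetV, List.getD] at h
      simp [pvMark, pvFalses, List.getD]
      have := pvCountFalseSet r j h
      omega
    | succ i =>
      simp [pvGetV, List.getD] at h
      have := ih i h
      simp [pvMark, pvFalses, List.getD] at this ⊢
      omega

-- ===== PORT A =====
-- fuel-based transliteration of A's recursion; fuel (number of unvisited cells + 1) only makes the
-- recursion total in Lean and is always sufficient (proved below)
def pvGoA (fuel : Nat) (M N : Int) (grid : List (List String)) (v : List (List Bool)) (x y : Int) :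
    Int × List (List Bool) :=
  match fuel with
  | 0 => (0, v)
  | f + 1 =>
    if x < 0 ∨ M ≤ x ∨ y < 0 ∨ N ≤ y ∨ pvGetG grid x.toNat y.toNat = "." ∨ pvGetV v x.toNat y.toNat = true then
      (0, v)
    else
      let v1 := pvMark v x.toNat y.toNat
      (PySem.List.pyRange (-1) 2 1).foldl (fun s i =>
        (PySem.List.pyRange (-1) 2 1).foldl (fun s j =>
          let r := pvGoA f M N grid s.2 (x + i) (y + j)
          (s.1 + r.1, r.2)) s) (1, v1)

def count_infected_people (M : Int) (N : Int) (grid : List (List String)) (visited : List (List Bool)) (x : Int) (y : Int) : Int :=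
  (pvGoA (pvFalses visited + 1) M N grid visited x y).1

-- ===== PORT B =====
def pvDirs : List (Int × Int) := [(1,1),(1,0),(1,-1),(0,1),(0,-1),(-1,1),(-1,0),(-1,-1)]

-- the explicit stack loop; head of the list = top of the stack (Python's end of list)
def pvLoopB (M N : Int) (grid : List (List String)) (v : List (List Bool)) (stack : List (Int × Int)) (cnt : Int) : Int :=
  match stack with
  | [] => cnt
  | (cx, cy) :: rest =>
    if h : cx < 0 ∨ M ≤ cx ∨ cy < 0 ∨ N ≤ cy ∨ pvGetG grid cx.toNat cy.toNat = "." ∨ pvGetV v cx.toNat cy.toNat = true then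
      pvLoopB M N grid v rest cnt
    else
      pvLoopB M N grid (pvMark v cx.toNat cy.toNat)
        (pvDirs.foldl (fun st d => (cx + d.1, cy + d.2) :: st) rest) (cnt + 1)
termination_by 10 * pvFalses v + stack.length
decreasing_by
  · simp
  · have hv : pvGetV v cx.toNat cy.toNat = false := by
      rcases Bool.eq_false_or_eq_true (pvGetV v cx.toNat cy.toNat) with h' | h'
      · exact absurd (Or.inr (Or.inr (Or.inr (Or.inr (Or.inr h'))))) h
      · exact h'
    have := pvFalses_mark v cx.toNat cy.toNat hv
    simp [pvDirs, List.foldl]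
    omega

def count_infected_people_alt (M : Int) (N : Int) (grid : List (List String)) (visited : List (List Bool)) (x : Int) (y : Int) : Int :=
  pvLoopB M N grid visited [(x, y)] 0

-- ===== PRECONDITION & SPEC =====
-- Pre_ excludes inputs on which Python A raises IndexError (an in-bounds start but grid/visited
-- missing rows or rows shorter than N); to stay closed-form it also excludes some ragged inputs
-- that A's search happens never to index (e.g. the start cell is '.'), on which both return 0.
def Pre_count_infected_people (M : Int) (N : Int) (grid : List (List String)) (visited : List (List Bool)) (x : Int) (y : Int) : Prop :=
  (x < 0 ∨ M ≤ x ∨ y < 0 ∨ N ≤ y) ∨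
  (M ≤ (grid.length : Int) ∧ M ≤ (visited.length : Int) ∧
    ∀ i < M.toNat, N ≤ ((grid.getD i []).length : Int) ∧ N ≤ ((visited.getD i []).length : Int))
instance (M : Int) (N : Int) (grid : List (List String)) (visited : List (List Bool)) (x : Int) (y : Int) : Decidable (Pre_count_infected_people M N grid visited x y) := by unfold Pre_count_infected_people; infer_instance

def pvWitness_count_infected_people : Int × Int × List (List String) × List (List Bool) × Int × Int :=
  (2, 2, [["#", "#"], [".", "#"]], [[false, false], [false, false]], 0, 0)

def Spec_count_infected_people (M : Int) (N : Int) (grid : List (List String)) (visited : List (List Bool)) (x : Int) (y : Int) (out : Int) : Prop := out = count_infected_people_alt M N grid visited x y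
instance (M : Int) (N : Int) (grid : List (List String)) (visited : List (List Bool)) (x : Int) (y : Int) (out : Int) : Decidable (Spec_count_infected_people M N grid visited x y out) := by unfold Spec_count_infected_people; infer_instance

-- ===== CLAIM (what is proved, stated in full; the proofs are below) =====
def Claim_equal_count_infected_people : Prop := ∀ (M : Int) (N : Int) (grid : List (List String)) (visited : List (List Bool)) (x : Int) (y : Int), Dom_count_infected_people M N grid visited x y → Pre_count_infected_people M N grid visited x y → Spec_count_infected_people M N grid visited x y (count_infected_people M N grid visited x y)

-- ===== LEMMAS AND PROOFS =====

-- more cell lemmas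
theorem pvSetGetDTrue (r : List Bool) (j b : Nat) (h : r.getD b true = true) :
    (r.set j true).getD b true = true := by
  induction r generalizing j b with
  | nil => simp [List.getD]
  | cons hd tl ih =>
    cases j with
    | zero => cases b with
      | zero => simp [List.getD]
      | succ b => simp [List.getD] at h ⊢; exact h
    | succ j => cases b with
      | zero => simp [List.getD] at h ⊢; exact h
      | succ b => simp [List.getD] at h ⊢; exact ih j b h

theorem pvSetGetDSelf (r : List Bool) (j : Nat) (h : r.getD j true = false) :
    (r.set j true).getD j true = true := by
  induction r generalizing j with
  | nil => simp [List.getD] at h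
  | cons hd tl ih =>
    cases j with
    | zero => simp [List.getD]
    | succ j => simp [List.getD] at h ⊢; exact ih j h

theorem pvMark_cons_succ (r : List Bool) (t : List (List Bool)) (i j : Nat) :
    pvMark (r :: t) (i + 1) j = r :: pvMark t i j := by
  simp [pvMark, List.getD]

theorem pvMark_pres_true (v : List (List Bool)) (i j a b : Nat) (h : pvGetV v a b = true) :
    pvGetV (pvMark v i j) a b = true := by
  induction v generalizing i a with
  | nil => simpa [pvMark] using h
  | cons r t ih =>
    cases i with
    | zero =>
      cases a with
      | zero =>
        simp [pvGetV, pvMark, List.getD] at h ⊢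
        exact pvSetGetDTrue r j b h
      | succ a => simpa [pvGetV, pvMark, List.getD] using h
    | succ i =>
      rw [pvMark_cons_succ]
      cases a with
      | zero => simpa [pvGetV, List.getD] using h
      | succ a =>
        simp [pvGetV, List.getD] at h ⊢
        exact ih i a h

theorem pvMark_self_true (v : List (List Bool)) (i j : Nat) (h : pvGetV v i j = false) :
    pvGetV (pvMark v i j) i j = true := by
  induction v generalizing i with
  | nil => simp [pvGetV, List.getD] at h
  | cons r t ih =>
    cases i with
    | zero =>
      simp [pvGetV, List.getD] at h
      simp [pvGetV, pvMark, List.getD]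
      exact pvSetGetDSelf r j h
    | succ i =>
      rw [pvMark_cons_succ]
      simp [pvGetV, List.getD] at h ⊢
      exact ih i h

-- A's blocking condition, spelled out (no abbreviation, so the Decidable instances are the stock ones)
theorem pvGuard_false_getV (M N : Int) (grid : List (List String)) (v : List (List Bool)) (x y : Int)
    (h : ¬ (x < 0 ∨ M ≤ x ∨ y < 0 ∨ N ≤ y ∨ pvGetG grid x.toNat y.toNat = "." ∨ pvGetV v x.toNat y.toNat = true)) :
    pvGetV v x.toNat y.toNat = false := by
  rcases Bool.eq_false_or_eq_true (pvGetV v x.toNat y.toNat) with h' | h'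
  · exact absurd (Or.inr (Or.inr (Or.inr (Or.inr (Or.inr h'))))) h
  · exact h'

def pvStep (f : Nat) (M N : Int) (grid : List (List String))
    (s : Int × List (List Bool)) (p : Int × Int) : Int × List (List Bool) :=
  let r := pvGoA f M N grid s.2 p.1 p.2
  (s.1 + r.1, r.2)

def pvCells (f : Nat) (M N : Int) (grid : List (List String)) (v : List (List Bool))
    (L : List (Int × Int)) : Int × List (List Bool) :=
  L.foldl (pvStep f M N grid) (0, v)

theorem pvCells_shift (f : Nat) (M N : Int) (grid : List (List String)) (L : List (Int × Int)) :
    ∀ (a : Int) (v : List (List Bool)),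
      L.foldl (pvStep f M N grid) (a, v)
        = (a + (pvCells f M N grid v L).1, (pvCells f M N grid v L).2) := by
  induction L with
  | nil => intro a v; simp [pvCells]
  | cons p ps ih =>
    intro a v
    have h1 : List.foldl (pvStep f M N grid) (a, v) (p :: ps)
        = List.foldl (pvStep f M N grid) (a + (pvGoA f M N grid v p.1 p.2).1, (pvGoA f M N grid v p.1 p.2).2) ps := rfl
    have h2 : pvCells f M N grid v (p :: ps)
        = List.foldl (pvStep f M N grid) ((pvGoA f M N grid v p.1 p.2).1, (pvGoA f M N grid v p.1 p.2).2) ps := by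
      simp [pvCells, pvStep, List.foldl]
    rw [h1, ih, h2, ih]
    simp [add_assoc]

theorem pvCells_cons (f : Nat) (M N : Int) (grid : List (List String)) (v : List (List Bool))
    (p : Int × Int) (ps : List (Int × Int)) :
    pvCells f M N grid v (p :: ps)
      = ((pvGoA f M N grid v p.1 p.2).1 + (pvCells f M N grid (pvGoA f M N grid v p.1 p.2).2 ps).1,
         (pvCells f M N grid (pvGoA f M N grid v p.1 p.2).2 ps).2) := by
  have h2 : pvCells f M N grid v (p :: ps)
      = List.foldl (pvStep f M N grid) ((pvGoA f M N grid v p.1 p.2).1, (pvGoA f M N grid v p.1 p.2).2) ps := by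
    simp [pvCells, pvStep, List.foldl]
  rw [h2, pvCells_shift]

def pvNbrs (x y : Int) : List (Int × Int) :=
  [(x + -1, y + -1), (x + -1, y + 0), (x + -1, y + 1),
   (x + 0, y + -1), (x + 0, y + 0), (x + 0, y + 1),
   (x + 1, y + -1), (x + 1, y + 0), (x + 1, y + 1)]

def pvNbrs8 (x y : Int) : List (Int × Int) :=
  [(x + -1, y + -1), (x + -1, y + 0), (x + -1, y + 1),
   (x + 0, y + -1), (x + 0, y + 1),
   (x + 1, y + -1), (x + 1, y + 0), (x + 1, y + 1)]

theorem pvRange3 : PySem.List.pyRange (-1) 2 1 = [-1, 0, 1] := by decide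

theorem pvGoA_succ (f : Nat) (M N : Int) (grid : List (List String)) (v : List (List Bool)) (x y : Int) :
    pvGoA (f + 1) M N grid v x y
      = if (x < 0 ∨ M ≤ x ∨ y < 0 ∨ N ≤ y ∨ pvGetG grid x.toNat y.toNat = "." ∨ pvGetV v x.toNat y.toNat = true) then (0, v)
        else (1 + (pvCells f M N grid (pvMark v x.toNat y.toNat) (pvNbrs x y)).1,
              (pvCells f M N grid (pvMark v x.toNat y.toNat) (pvNbrs x y)).2) := by
  rw [pvGoA]
  by_cases h : (x < 0 ∨ M ≤ x ∨ y < 0 ∨ N ≤ y ∨ pvGetG grid x.toNat y.toNat = "." ∨ pvGetV v x.toNat y.toNat = true)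
  · have h' : x < 0 ∨ M ≤ x ∨ y < 0 ∨ N ≤ y ∨ pvGetG grid x.toNat y.toNat = "." ∨ pvGetV v x.toNat y.toNat = true := h
    rw [if_pos h', if_pos h]
  · have h' : ¬ (x < 0 ∨ M ≤ x ∨ y < 0 ∨ N ≤ y ∨ pvGetG grid x.toNat y.toNat = "." ∨ pvGetV v x.toNat y.toNat = true) := h
    rw [if_neg h', if_neg h, pvRange3]
    show (pvNbrs x y).foldl (pvStep f M N grid) (1, pvMark v x.toNat y.toNat)
        = (1 + (pvCells f M N grid (pvMark v x.toNat y.toNat) (pvNbrs x y)).1,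
           (pvCells f M N grid (pvMark v x.toNat y.toNat) (pvNbrs x y)).2)
    rw [pvCells_shift]

theorem pvFalses_cells_le (f : Nat) (M N : Int) (grid : List (List String))
    (hA : ∀ (v : List (List Bool)) (x y : Int), pvFalses (pvGoA f M N grid v x y).2 ≤ pvFalses v)
    (L : List (Int × Int)) : ∀ v, pvFalses (pvCells f M N grid v L).2 ≤ pvFalses v := by
  induction L with
  | nil => intro v; simp [pvCells]
  | cons p ps ih =>
    intro v
    rw [pvCells_cons]
    exact le_trans (ih _) (hA v p.1 p.2)

theorem pvFalses_goA_le (f : Nat) (M N : Int) (grid : List (List String)) :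
    ∀ (v : List (List Bool)) (x y : Int), pvFalses (pvGoA f M N grid v x y).2 ≤ pvFalses v := by
  induction f with
  | zero => intro v x y; simp [pvGoA]
  | succ f ih =>
    intro v x y
    rw [pvGoA_succ]
    by_cases h : (x < 0 ∨ M ≤ x ∨ y < 0 ∨ N ≤ y ∨ pvGetG grid x.toNat y.toNat = "." ∨ pvGetV v x.toNat y.toNat = true)
    · rw [if_pos h]
    · rw [if_neg h]
      have hv := pvGuard_false_getV M N grid v x y h
      have hm := pvFalses_mark v x.toNat y.toNat hv
      have := pvFalses_cells_le f M N grid ih (pvNbrs x y) (pvMark v x.toNat y.toNat)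
      simp only []
      omega

theorem pvCells_pres_true (f : Nat) (M N : Int) (grid : List (List String))
    (hA : ∀ (v : List (List Bool)) (x y : Int) (a b : Nat),
        pvGetV v a b = true → pvGetV (pvGoA f M N grid v x y).2 a b = true)
    (L : List (Int × Int)) : ∀ v a b, pvGetV v a b = true → pvGetV (pvCells f M N grid v L).2 a b = true := by
  induction L with
  | nil => intro v a b h; simpa [pvCells] using h
  | cons p ps ih =>
    intro v a b h
    rw [pvCells_cons]
    exact ih _ a b (hA v p.1 p.2 a b h)

theorem pvGoA_pres_true (f : Nat) (M N : Int) (grid : List (List String)) :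
    ∀ (v : List (List Bool)) (x y : Int) (a b : Nat),
      pvGetV v a b = true → pvGetV (pvGoA f M N grid v x y).2 a b = true := by
  induction f with
  | zero => intro v x y a b h; simpa [pvGoA] using h
  | succ f ih =>
    intro v x y a b h
    rw [pvGoA_succ]
    by_cases hg : (x < 0 ∨ M ≤ x ∨ y < 0 ∨ N ≤ y ∨ pvGetG grid x.toNat y.toNat = "." ∨ pvGetV v x.toNat y.toNat = true)
    · rw [if_pos hg]; exact h
    · rw [if_neg hg]
      exact pvCells_pres_true f M N grid ih (pvNbrs x y) _ a b (pvMark_pres_true v _ _ a b h)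

theorem pvGoA_irrel (n : Nat) (M N : Int) (grid : List (List String)) :
    ∀ (f g : Nat) (v : List (List Bool)) (x y : Int), f ≤ n → g ≤ n →
      pvFalses v < f → pvFalses v < g → pvGoA f M N grid v x y = pvGoA g M N grid v x y := by
  induction n with
  | zero => intro f g v x y hf hg hvf hvg; omega
  | succ n ih =>
    intro f g v x y hf hg hvf hvg
    obtain ⟨f', rfl⟩ : ∃ f', f = f' + 1 := ⟨f - 1, by omega⟩
    obtain ⟨g', rfl⟩ : ∃ g', g = g' + 1 := ⟨g - 1, by omega⟩
    rw [pvGoA_succ, pvGoA_succ]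
    by_cases h : (x < 0 ∨ M ≤ x ∨ y < 0 ∨ N ≤ y ∨ pvGetG grid x.toNat y.toNat = "." ∨ pvGetV v x.toNat y.toNat = true)
    · rw [if_pos h, if_pos h]
    · rw [if_neg h, if_neg h]
      have hv := pvGuard_false_getV M N grid v x y h
      have hm := pvFalses_mark v x.toNat y.toNat hv
      have hcells : ∀ (L : List (Int × Int)) (v' : List (List Bool)),
          pvFalses v' < f' → pvFalses v' < g' → pvCells f' M N grid v' L = pvCells g' M N grid v' L := by
        intro L
        induction L with
        | nil => intro v' _ _; simp [pvCells]
        | cons p ps ihL =>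
          intro v' h1 h2
          rw [pvCells_cons, pvCells_cons]
          have hhd : pvGoA f' M N grid v' p.1 p.2 = pvGoA g' M N grid v' p.1 p.2 :=
            ih f' g' v' p.1 p.2 (by omega) (by omega) h1 h2
          rw [hhd]
          have h3 := pvFalses_goA_le g' M N grid v' p.1 p.2
          rw [ihL _ (by omega) (by omega)]
      rw [hcells (pvNbrs x y) (pvMark v x.toNat y.toNat) (by omega) (by omega)]

-- canonical (fuel-free) presentation of A's recursion
def pvAcell (M N : Int) (grid : List (List String)) (v : List (List Bool)) (p : Int × Int) :
    Int × List (List Bool) :=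
  pvGoA (pvFalses v + 1) M N grid v p.1 p.2

def pvAcells (M N : Int) (grid : List (List String)) :
    List (List Bool) → List (Int × Int) → Int × List (List Bool)
  | v, [] => (0, v)
  | v, p :: ps =>
    let a := pvAcell M N grid v p
    let b := pvAcells M N grid a.2 ps
    (a.1 + b.1, b.2)

theorem pvCells_eq_acells (f : Nat) (M N : Int) (grid : List (List String)) (L : List (Int × Int)) :
    ∀ v, pvFalses v < f → pvCells f M N grid v L = pvAcells M N grid v L := by
  induction L with
  | nil => intro v h; simp [pvCells, pvAcells]
  | cons p ps ih =>
    intro v h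
    rw [pvCells_cons]
    have hhd : pvGoA f M N grid v p.1 p.2 = pvAcell M N grid v p := by
      exact pvGoA_irrel (max f (pvFalses v + 1)) M N grid f (pvFalses v + 1) v p.1 p.2
        (le_max_left _ _) (le_max_right _ _) h (by omega)
    rw [hhd]
    have h2 : pvFalses (pvAcell M N grid v p).2 ≤ pvFalses v := pvFalses_goA_le _ M N grid v p.1 p.2
    rw [ih _ (by omega)]
    simp [pvAcells]

theorem pvAcell_eq (M N : Int) (grid : List (List String)) (v : List (List Bool)) (x y : Int) :
    pvAcell M N grid v (x, y)
      = if (x < 0 ∨ M ≤ x ∨ y < 0 ∨ N ≤ y ∨ pvGetG grid x.toNat y.toNat = "." ∨ pvGetV v x.toNat y.toNat = true) then (0, v)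
        else (1 + (pvAcells M N grid (pvMark v x.toNat y.toNat) (pvNbrs x y)).1,
              (pvAcells M N grid (pvMark v x.toNat y.toNat) (pvNbrs x y)).2) := by
  show pvGoA (pvFalses v + 1) M N grid v x y = _
  rw [pvGoA_succ]
  by_cases h : (x < 0 ∨ M ≤ x ∨ y < 0 ∨ N ≤ y ∨ pvGetG grid x.toNat y.toNat = "." ∨ pvGetV v x.toNat y.toNat = true)
  · rw [if_pos h, if_pos h]
  · rw [if_neg h, if_neg h]
    have hv := pvGuard_false_getV M N grid v x y h
    have hm := pvFalses_mark v x.toNat y.toNat hv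
    rw [pvCells_eq_acells _ M N grid _ _ (by omega)]

theorem pvAcells_append (M N : Int) (grid : List (List String)) (L1 L2 : List (Int × Int)) :
    ∀ v, pvAcells M N grid v (L1 ++ L2)
      = ((pvAcells M N grid v L1).1 + (pvAcells M N grid (pvAcells M N grid v L1).2 L2).1,
         (pvAcells M N grid (pvAcells M N grid v L1).2 L2).2) := by
  induction L1 with
  | nil => intro v; simp [pvAcells]
  | cons p ps ih =>
    intro v
    simp only [List.cons_append, pvAcells]
    rw [ih]
    simp [add_assoc]

theorem pvFalses_acells_le (M N : Int) (grid : List (List String)) (L : List (Int × Int)) :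
    ∀ v, pvFalses (pvAcells M N grid v L).2 ≤ pvFalses v := by
  induction L with
  | nil => intro v; simp [pvAcells]
  | cons p ps ih =>
    intro v
    simp only [pvAcells]
    exact le_trans (ih _) (pvFalses_goA_le _ M N grid v p.1 p.2)

theorem pvAcells_pres_true (M N : Int) (grid : List (List String)) (L : List (Int × Int)) :
    ∀ v a b, pvGetV v a b = true → pvGetV (pvAcells M N grid v L).2 a b = true := by
  induction L with
  | nil => intro v a b h; simpa [pvAcells] using h
  | cons p ps ih =>
    intro v a b h
    simp only [pvAcells]
    exact ih _ a b (pvGoA_pres_true _ M N grid v p.1 p.2 a b h)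

theorem pvAcell_skip (M N : Int) (grid : List (List String)) (v : List (List Bool)) (x y : Int)
    (h : pvGetV v x.toNat y.toNat = true) : pvAcell M N grid v (x, y) = (0, v) := by
  have hg : (x < 0 ∨ M ≤ x ∨ y < 0 ∨ N ≤ y ∨ pvGetG grid x.toNat y.toNat = "." ∨ pvGetV v x.toNat y.toNat = true) := Or.inr (Or.inr (Or.inr (Or.inr (Or.inr h))))
  rw [pvAcell_eq, if_pos hg]

theorem pvAcells_9_eq_8 (M N : Int) (grid : List (List String)) (v : List (List Bool)) (x y : Int)
    (h : pvGetV v x.toNat y.toNat = true) :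
    pvAcells M N grid v (pvNbrs x y) = pvAcells M N grid v (pvNbrs8 x y) := by
  have h9 : pvNbrs x y
      = [(x + -1, y + -1), (x + -1, y + 0), (x + -1, y + 1), (x + 0, y + -1)]
        ++ ((x + 0, y + 0) :: [(x + 0, y + 1), (x + 1, y + -1), (x + 1, y + 0), (x + 1, y + 1)]) := rfl
  have h8 : pvNbrs8 x y
      = [(x + -1, y + -1), (x + -1, y + 0), (x + -1, y + 1), (x + 0, y + -1)]
        ++ [(x + 0, y + 1), (x + 1, y + -1), (x + 1, y + 0), (x + 1, y + 1)] := rfl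
  rw [h9, h8, pvAcells_append, pvAcells_append]
  set w := (pvAcells M N grid v [(x + -1, y + -1), (x + -1, y + 0), (x + -1, y + 1), (x + 0, y + -1)]).2 with hw
  have hwx : pvGetV w x.toNat y.toNat = true := pvAcells_pres_true M N grid _ v _ _ h
  have hskip : pvAcell M N grid w (x + 0, y + 0) = (0, w) := by
    have : pvAcell M N grid w (x + 0, y + 0) = pvAcell M N grid w (x, y) := by norm_num
    rw [this]
    exact pvAcell_skip M N grid w x y hwx
  show _ = _
  simp only [pvAcells, hskip]
  simp

-- unfolding lemmas for B's loop
theorem pvLoopB_nil (M N : Int) (grid : List (List String)) (v : List (List Bool)) (cnt : Int) :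
    pvLoopB M N grid v [] cnt = cnt := by
  rw [pvLoopB]

theorem pvLoopB_skip (M N : Int) (grid : List (List String)) (v : List (List Bool))
    (cx cy : Int) (rest : List (Int × Int)) (cnt : Int) (h : (cx < 0 ∨ M ≤ cx ∨ cy < 0 ∨ N ≤ cy ∨ pvGetG grid cx.toNat cy.toNat = "." ∨ pvGetV v cx.toNat cy.toNat = true)) :
    pvLoopB M N grid v ((cx, cy) :: rest) cnt = pvLoopB M N grid v rest cnt := by
  have h' : cx < 0 ∨ M ≤ cx ∨ cy < 0 ∨ N ≤ cy ∨ pvGetG grid cx.toNat cy.toNat = "." ∨ pvGetV v cx.toNat cy.toNat = true := h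
  rw [pvLoopB]
  exact dif_pos h'

theorem pvLoopB_mark (M N : Int) (grid : List (List String)) (v : List (List Bool))
    (cx cy : Int) (rest : List (Int × Int)) (cnt : Int) (h : ¬ (cx < 0 ∨ M ≤ cx ∨ cy < 0 ∨ N ≤ cy ∨ pvGetG grid cx.toNat cy.toNat = "." ∨ pvGetV v cx.toNat cy.toNat = true)) :
    pvLoopB M N grid v ((cx, cy) :: rest) cnt
      = pvLoopB M N grid (pvMark v cx.toNat cy.toNat) (pvNbrs8 cx cy ++ rest) (cnt + 1) := by
  have h' : ¬ (cx < 0 ∨ M ≤ cx ∨ cy < 0 ∨ N ≤ cy ∨ pvGetG grid cx.toNat cy.toNat = "." ∨ pvGetV v cx.toNat cy.toNat = true) := h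
  rw [pvLoopB]
  have hd : pvDirs.foldl (fun st d => (cx + d.1, cy + d.2) :: st) rest = pvNbrs8 cx cy ++ rest := rfl
  rw [dif_neg h', hd]

-- the simulation: running B's stack loop on L ++ S equals processing L with A's recursion first
theorem pvMain (M N : Int) (grid : List (List String)) :
    ∀ (n : Nat) (v : List (List Bool)) (L S : List (Int × Int)) (cnt : Int),
      10 * pvFalses v + L.length ≤ n →
      pvLoopB M N grid v (L ++ S) cnt
        = pvLoopB M N grid (pvAcells M N grid v L).2 S (cnt + (pvAcells M N grid v L).1) := by
  intro n
  induction n with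
  | zero =>
    intro v L S cnt hm
    have : L = [] := by cases L with | nil => rfl | cons p ps => simp at hm
    subst this
    simp [pvAcells]
  | succ n ih =>
    intro v L S cnt hm
    cases L with
    | nil => simp [pvAcells]
    | cons p ps =>
      obtain ⟨cx, cy⟩ := p
      by_cases h : (cx < 0 ∨ M ≤ cx ∨ cy < 0 ∨ N ≤ cy ∨ pvGetG grid cx.toNat cy.toNat = "." ∨ pvGetV v cx.toNat cy.toNat = true)
      · rw [List.cons_append, pvLoopB_skip M N grid v cx cy (ps ++ S) cnt h]
        rw [ih v ps S cnt (by simp at hm; omega)]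
        have ha : pvAcell M N grid v (cx, cy) = (0, v) := by rw [pvAcell_eq, if_pos h]
        simp only [pvAcells, ha]
        norm_num
      · have hv := pvGuard_false_getV M N grid v cx cy h
        have hmk := pvFalses_mark v cx.toNat cy.toNat hv
        set v1 := pvMark v cx.toNat cy.toNat with hv1
        rw [List.cons_append, pvLoopB_mark M N grid v cx cy (ps ++ S) cnt h]
        rw [ih v1 (pvNbrs8 cx cy) (ps ++ S) (cnt + 1) (by simp [pvNbrs8]; omega)]
        set w := (pvAcells M N grid v1 (pvNbrs8 cx cy)).2 with hwdef
        have hwle : pvFalses w ≤ pvFalses v1 := pvFalses_acells_le M N grid _ v1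
        rw [ih w ps S _ (by simp at hm; omega)]
        have hself : pvGetV v1 cx.toNat cy.toNat = true := pvMark_self_true v cx.toNat cy.toNat hv
        have ha : pvAcell M N grid v (cx, cy)
            = (1 + (pvAcells M N grid v1 (pvNbrs8 cx cy)).1, (pvAcells M N grid v1 (pvNbrs8 cx cy)).2) := by
          rw [pvAcell_eq, if_neg h, pvAcells_9_eq_8 M N grid v1 cx cy hself]
        simp only [pvAcells, ha]
        congr 1
        ring

theorem pvPorts_eq (M : Int) (N : Int) (grid : List (List String)) (visited : List (List Bool)) (x : Int) (y : Int) :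
    count_infected_people M N grid visited x y = count_infected_people_alt M N grid visited x y := by
  have hb : count_infected_people_alt M N grid visited x y
      = pvLoopB M N grid visited ([(x, y)] ++ []) 0 := by simp [count_infected_people_alt]
  rw [hb, pvMain M N grid (10 * pvFalses visited + 1) visited [(x, y)] [] 0 (by simp), pvLoopB_nil]
  have ha : count_infected_people M N grid visited x y = (pvAcell M N grid visited (x, y)).1 := rfl
  rw [ha]
  simp [pvAcells]

theorem count_infected_people_spec : Claim_equal_count_infected_people := by
  intro M N grid visited x y _ _
  unfold Spec_count_infected_people
  exact pvPorts_eq M N grid visited x y
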